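-- pv_equiv track=rewrite | github.com/arkapatra31/Data-Structures-Algorithm_System-Design | Graphs/02_bfs.py | bfs_with_levels
-- ===== SOURCE A (Python) =====
-- from collections import deque
--
-- def bfs_with_levels(graph, start):
--     """
--     BFS that also tracks which level each node was discovered at.
--     Useful for finding distances in unweighted graphs.
--
--     Returns:
--         dict — {vertex: level_number}
--     """
--     visited = set([start])
--     queue = deque([(start, 0)])
--     levels = {}
--
--     while queue:
--         vertex, level = queue.popleft()
--         levels[vertex] = level
--
--         for neighbor in graph[vertex]:
--             if neighbor not in visited:
--                 visited.add(neighbor)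
--                 queue.append((neighbor, level + 1))
--
--     return levels
-- ===== SOURCE B (Python) =====
-- def bfs_with_levels(graph, start):
--     visited = {start}
--     frontier = [start]
--     level = 0
--     levels = {}
--     while frontier:
--         for v in frontier:
--             levels[v] = level
--         next_frontier = []
--         for v in frontier:
--             for n in graph[v]:
--                 if n not in visited:
--                     visited.add(n)
--                     next_frontier.append(n)
--         frontier = next_frontier
--         level += 1
--     return levels
-- ===== Notes on version B (the rewrite author's own statement) =====
-- stated objective: alternative
-- what changed: Replaced the (node, level) deque-based BFS by a level-synchronous BFS that processes whole frontiers: assign the current level to every frontier node, then build the next frontier from their unvisited neighbours; no per-node level bookkeeping in the queue.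
import Mathlib
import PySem

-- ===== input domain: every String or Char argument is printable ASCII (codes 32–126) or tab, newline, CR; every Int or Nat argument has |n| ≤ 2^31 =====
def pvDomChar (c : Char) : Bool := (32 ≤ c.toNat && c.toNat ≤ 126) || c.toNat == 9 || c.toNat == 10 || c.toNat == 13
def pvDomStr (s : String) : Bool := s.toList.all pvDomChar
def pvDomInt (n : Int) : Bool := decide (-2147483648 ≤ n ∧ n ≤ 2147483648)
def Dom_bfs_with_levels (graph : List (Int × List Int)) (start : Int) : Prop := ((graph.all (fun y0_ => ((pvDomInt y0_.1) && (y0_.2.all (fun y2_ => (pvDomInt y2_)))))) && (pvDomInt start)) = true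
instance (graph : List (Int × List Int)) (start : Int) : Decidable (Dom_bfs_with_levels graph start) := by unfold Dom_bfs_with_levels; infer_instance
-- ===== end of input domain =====

-- B replaces the (node, level) deque of A by level-synchronous BFS over whole frontiers
-- (objective: alternative decomposition, same asymptotic cost).

-- ===== PORT A =====
-- termination helpers (cited by the ports' decreasing_by): the universe of enqueueable nodes
def pvU (adj : PySem.Dict Int (List Int)) : Finset Int := ((adj.values).flatMap id).toFinset

lemma pvMemU (adj : PySem.Dict Int (List Int)) (v n : Int) (h : n ∈ adj.getD v []) : n ∈ pvU adj := by
  rw [PySem.Dict.getD_eq_get?_getD] at h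
  rcases hg : adj.get? v with _ | ns
  · rw [hg] at h; simp at h
  · rw [hg] at h
    have hm : (v, ns) ∈ adj.items := PySem.Dict.mem_items_of_get?_eq_some adj hg
    have hv : ns ∈ adj.values := by
      simp only [PySem.Dict.values]
      exact List.mem_map.mpr ⟨(v, ns), hm, rfl⟩
    simp only [pvU, List.mem_toFinset, List.mem_flatMap]
    exact ⟨ns, hv, by simpa using h⟩

-- one "for neighbor in …" loop shrinks the measure 2·|U \ visited| + |queue| (both ports' inner loop has this shape)
lemma pvFoldMeasure {α : Type} (U : Finset Int) (g : Int → α) :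
    ∀ (ns : List Int) (vis : PySem.Set Int) (q : List α),
      (∀ n ∈ ns, n ∈ U) →
      2 * (U \ (ns.foldl (fun s n => if PySem.Set.contains s.1 n then s else (PySem.Set.add s.1 n, s.2 ++ [g n])) (vis, q)).1.toFinset).card
        + (ns.foldl (fun s n => if PySem.Set.contains s.1 n then s else (PySem.Set.add s.1 n, s.2 ++ [g n])) (vis, q)).2.length
      ≤ 2 * (U \ vis.toFinset).card + q.length := by
  intro ns
  induction ns with
  | nil => intro vis q _; simp
  | cons n ns ih =>
    intro vis q h
    simp only [List.foldl_cons]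
    by_cases hc : PySem.Set.contains vis n
    · rw [if_pos hc]
      exact ih vis q (fun m hm => h m (List.mem_cons_of_mem _ hm))
    · rw [if_neg hc]
      have hnv : n ∉ vis := fun hmem => hc ((PySem.Set.contains_iff vis n).mpr hmem)
      refine le_trans (ih _ _ (fun m hm => h m (List.mem_cons_of_mem _ hm))) ?_
      rw [PySem.Set.add_of_not_mem hnv]
      have hset : (vis ++ [n]).toFinset = insert n vis.toFinset := by
        simp [List.toFinset_append]
      rw [hset]
      have hn : n ∈ U \ vis.toFinset :=
        Finset.mem_sdiff.mpr ⟨h n (List.mem_cons_self), by simpa using hnv⟩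
      have hcard : (U \ insert n vis.toFinset).card = (U \ vis.toFinset).card - 1 := by
        rw [Finset.sdiff_insert, Finset.card_erase_of_mem hn]
      have hpos : 1 ≤ (U \ vis.toFinset).card := Finset.card_pos.mpr ⟨n, hn⟩
      simp only [List.length_append, List.length_cons, List.length_nil, hcard]
      omega

-- the body of A's inner loop: 'if neighbor not in visited: visited.add(…); queue.append((…, level+1))'
def pvStepA (lvl : Int) (s : PySem.Set Int × List (Int × Int)) (n : Int) : PySem.Set Int × List (Int × Int) :=
  if PySem.Set.contains s.1 n then s else (PySem.Set.add s.1 n, s.2 ++ [(n, lvl)])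

-- A's 'while queue' loop: pop left, record level, enqueue unvisited neighbours
def bfsLoopA (adj : PySem.Dict Int (List Int)) (vis : PySem.Set Int) (queue : List (Int × Int)) (levels : PySem.Dict Int Int) : PySem.Dict Int Int :=
  match queue with
  | [] => levels
  | (v, lvl) :: rest =>
    let levels' := levels.insert v lvl
    let s := (adj.getD v []).foldl (pvStepA (lvl + 1)) (vis, rest)
    bfsLoopA adj s.1 s.2 levels'
termination_by 2 * ((pvU adj) \ vis.toFinset).card + queue.length
decreasing_by
  have h : 2 * ((pvU adj) \ ((adj.getD v []).foldl (pvStepA (lvl + 1)) (vis, rest)).1.toFinset).card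
        + ((adj.getD v []).foldl (pvStepA (lvl + 1)) (vis, rest)).2.length
      ≤ 2 * ((pvU adj) \ vis.toFinset).card + rest.length :=
    pvFoldMeasure (pvU adj) (fun n => (n, lvl + 1)) (adj.getD v []) vis rest
      (fun n hn => pvMemU adj v n hn)
  simp only [List.length_cons]
  omega

-- graph[vertex] is dict access; Python raises KeyError on a missing vertex (A and B access the same
-- vertices in the same order, so they raise identically there — nothing is claimed about raising runs);
-- the port models the access with getD [], whose default is never consulted on a run where Python returns
def bfs_with_levels (graph : List (Int × List Int)) (start : Int) : List (Int × Int) :=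
  let adj := PySem.Dict.ofList graph
  (bfsLoopA adj (PySem.Set.ofList [start]) [(start, 0)] PySem.Dict.empty).items

-- ===== PORT B =====
-- the body of B's inner loop: 'if n not in visited: visited.add(n); next_frontier.append(n)'
def pvStepB (s : PySem.Set Int × List Int) (n : Int) : PySem.Set Int × List Int :=
  if PySem.Set.contains s.1 n then s else (PySem.Set.add s.1 n, s.2 ++ [n])

-- B's 'for v in frontier: for n in graph[v]: …' nested loop building the next frontier
def pvExpandB (adj : PySem.Dict Int (List Int)) (s : PySem.Set Int × List Int) (frontier : List Int) : PySem.Set Int × List Int :=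
  frontier.foldl (fun s v => (adj.getD v []).foldl pvStepB s) s

lemma pvExpandMeasure (adj : PySem.Dict Int (List Int)) :
    ∀ (f : List Int) (s : PySem.Set Int × List Int),
      2 * ((pvU adj) \ (pvExpandB adj s f).1.toFinset).card + (pvExpandB adj s f).2.length
      ≤ 2 * ((pvU adj) \ s.1.toFinset).card + s.2.length := by
  intro f
  induction f with
  | nil => intro s; simp [pvExpandB]
  | cons v fs ih =>
    intro s
    obtain ⟨vis, acc⟩ := s
    have hcons : pvExpandB adj (vis, acc) (v :: fs)
        = pvExpandB adj ((adj.getD v []).foldl pvStepB (vis, acc)) fs := rfl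
    have h2 : 2 * ((pvU adj) \ ((adj.getD v []).foldl pvStepB (vis, acc)).1.toFinset).card
          + ((adj.getD v []).foldl pvStepB (vis, acc)).2.length
        ≤ 2 * ((pvU adj) \ vis.toFinset).card + acc.length :=
      pvFoldMeasure (pvU adj) (fun n => n) (adj.getD v []) vis acc
        (fun n hn => pvMemU adj v n hn)
    rw [hcons]
    exact le_trans (ih _) h2

-- B's 'while frontier' loop: assign this level to the whole frontier, then expand it
def bfsLoopB (adj : PySem.Dict Int (List Int)) (vis : PySem.Set Int) (frontier : List Int) (lvl : Int) (levels : PySem.Dict Int Int) : PySem.Dict Int Int :=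
  match frontier with
  | [] => levels
  | v :: fs =>
    let levels' := (v :: fs).foldl (fun (L : PySem.Dict Int Int) u => L.insert u lvl) levels
    let s := pvExpandB adj (vis, []) (v :: fs)
    bfsLoopB adj s.1 s.2 (lvl + 1) levels'
termination_by 2 * ((pvU adj) \ vis.toFinset).card + frontier.length
decreasing_by
  have h := pvExpandMeasure adj (v :: fs) (vis, [])
  simp only [List.length_nil, List.length_cons] at *
  omega

def bfs_with_levels_alt (graph : List (Int × List Int)) (start : Int) : List (Int × Int) :=
  let adj := PySem.Dict.ofList graph
  (bfsLoopB adj (PySem.Set.ofList [start]) [start] 0 PySem.Dict.empty).items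

-- ===== PRECONDITION & SPEC =====
-- A raises KeyError exactly when graph[v] is accessed for a vertex v without an entry, i.e. when some
-- vertex reachable from start is not a key. Pre_ states that closed-form: the reachable set, written as
-- the simultaneous neighbourhood closure (stable after at most #edges+1 rounds — membership only, no
-- queue/levels, not a copy of either port's recursion), is contained in the keys. The proofs below do
-- not need Pre_ (the ports agree on all inputs); Pre_ only delimits where the Pythons return.
def pvReach (graph : List (Int × List Int)) (start : Int) : PySem.Set Int :=
  (fun s => PySem.Set.update s (s.flatMap (fun v => (PySem.Dict.ofList graph).getD v [])))^[(graph.flatMap (fun p => p.2)).length + 1] (PySem.Set.ofList [start])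

def Pre_bfs_with_levels (graph : List (Int × List Int)) (start : Int) : Prop :=
  ∀ v ∈ pvReach graph start, v ∈ graph.map Prod.fst

instance (graph : List (Int × List Int)) (start : Int) : Decidable (Pre_bfs_with_levels graph start) := by
  unfold Pre_bfs_with_levels; infer_instance

def pvWitness_bfs_with_levels : (List (Int × List Int)) × Int := ([(0, [1]), (1, [0])], 0)

def Spec_bfs_with_levels (graph : List (Int × List Int)) (start : Int) (out : List (Int × Int)) : Prop := out = bfs_with_levels_alt graph start
instance (graph : List (Int × List Int)) (start : Int) (out : List (Int × Int)) : Decidable (Spec_bfs_with_levels graph start out) := by unfold Spec_bfs_with_levels; infer_instance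

-- ===== CLAIM (what is proved, stated in full; the proofs are below) =====
def Claim_equal_bfs_with_levels : Prop := ∀ (graph : List (Int × List Int)) (start : Int), Dom_bfs_with_levels graph start → Pre_bfs_with_levels graph start → Spec_bfs_with_levels graph start (bfs_with_levels graph start)

-- ===== LEMMAS AND PROOFS =====

-- A's inner loop at enqueue-level 'lvl' is B's inner loop with every appended node paired with 'lvl'
lemma pvInnerRel (lvl : Int) :
    ∀ (ns : List Int) (vis : PySem.Set Int) (q : List (Int × Int)) (acc : List Int),
      ns.foldl (pvStepA lvl) (vis, q ++ acc.map (fun n => (n, lvl)))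
      = ((ns.foldl pvStepB (vis, acc)).1, q ++ (ns.foldl pvStepB (vis, acc)).2.map (fun n => (n, lvl))) := by
  intro ns
  induction ns with
  | nil => intro vis q acc; rfl
  | cons n ns ih =>
    intro vis q acc
    simp only [List.foldl_cons, pvStepA, pvStepB]
    by_cases hc : PySem.Set.contains vis n
    · rw [if_pos hc, if_pos hc]; exact ih vis q acc
    · rw [if_neg hc, if_neg hc]
      have : (q ++ acc.map (fun n => (n, lvl))) ++ [(n, lvl)]
           = q ++ (acc ++ [n]).map (fun n => (n, lvl)) := by
        simp [List.map_append]
      rw [this]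
      exact ih (PySem.Set.add vis n) q (acc ++ [n])

-- consuming one whole level of A's queue = one frontier expansion of B
lemma pvStepRel (adj : PySem.Dict Int (List Int)) :
    ∀ (xs ys : List Int) (vis : PySem.Set Int) (L : PySem.Dict Int Int) (l : Int),
      bfsLoopA adj vis (xs.map (fun v => (v, l)) ++ ys.map (fun v => (v, l + 1))) L
      = bfsLoopA adj (pvExpandB adj (vis, ys) xs).1
          ((pvExpandB adj (vis, ys) xs).2.map (fun v => (v, l + 1)))
          (xs.foldl (fun (L : PySem.Dict Int Int) u => L.insert u l) L) := by
  intro xs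
  induction xs with
  | nil => intro ys vis L l; simp [pvExpandB]
  | cons x xs ih =>
    intro ys vis L l
    rw [List.map_cons, List.cons_append, bfsLoopA]
    rw [pvInnerRel (l + 1) (adj.getD x []) vis (xs.map (fun v => (v, l))) ys]
    rw [ih ((adj.getD x []).foldl pvStepB (vis, ys)).2
          ((adj.getD x []).foldl pvStepB (vis, ys)).1 (L.insert x l) l]
    have hE : pvExpandB adj (((adj.getD x []).foldl pvStepB (vis, ys)).1,
                             ((adj.getD x []).foldl pvStepB (vis, ys)).2) xs
            = pvExpandB adj (vis, ys) (x :: xs) := by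
      simp only [pvExpandB, List.foldl_cons]
    rw [hE]
    rfl

-- A's queue holding one whole level = B's state
lemma pvLoopRel (adj : PySem.Dict Int (List Int)) :
    ∀ (vis : PySem.Set Int) (f : List Int) (l : Int) (L : PySem.Dict Int Int),
      bfsLoopA adj vis (f.map (fun v => (v, l))) L = bfsLoopB adj vis f l L := by
  intro vis f l L
  fun_induction bfsLoopB adj vis f l L with
  | case1 vis l L => rw [List.map_nil, bfsLoopA]
  | case2 vis l L v fs levels' s ih =>
    have h0 : (v :: fs).map (fun u => (u, l))
            = (v :: fs).map (fun u => (u, l)) ++ ([] : List Int).map (fun u => (u, l + 1)) := by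
      simp
    rw [h0, pvStepRel adj (v :: fs) [] vis L l]
    exact ih

-- ===== VERDICT (by name: the statement is the Claim_ definition above) =====
theorem bfs_with_levels_spec : Claim_equal_bfs_with_levels := by
  intro graph start _ _
  show bfs_with_levels graph start = bfs_with_levels_alt graph start
  simp only [bfs_with_levels, bfs_with_levels_alt]
  rw [← pvLoopRel (PySem.Dict.ofList graph) (PySem.Set.ofList [start]) [start] 0 PySem.Dict.empty]
  rfl
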